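-- pv_equiv track=rewrite | github.com/RodrigoPombo1/Fundamentos-de-Programacao-Quiz-Pratico | QP06 Quiz 07_11 lists/Pergunta 3.py | local_minima
-- ===== SOURCE A (Python) =====
-- def local_minima(alist):
--     counter = 0
--     result_list = []
--     for i in range(len(alist) - 2):
--         list_3_elements = alist[counter:counter+3]
--         local_minima = get_local_minima(list_3_elements)
--         if local_minima != False:
--             result_list.append(local_minima[0])
--         counter += 1
--     return result_list
--
-- def get_local_minima(list_3_elements):
--     result_list = [list_3_elements[0]]
--     return_result = True
--     for i in range(1, 3):
--         if result_list[0] > list_3_elements[i]: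
--             result_list[0] = list_3_elements[i]
--             return_result = True
--         elif result_list[0] == list_3_elements[i]:
--             return_result = False
--     if return_result == True:
--         return result_list
--     else:
--         return False
-- ===== SOURCE B (Python) =====
-- def local_minima(alist):
--     # Two-stage, comparison-based approach: first compute the sign of each
--     # adjacent difference once; then decide every window from its pair of signs
--     # alone (the outer elements are compared only in the single ambiguous
--     # 'valley of unknown depth' case a < b > c).
--     signs = [(x > y) - (x < y) for x, y in zip(alist, alist[1:])]
--     out = []
--     for i in range(len(signs) - 1):
--         s1, s2 = signs[i], signs[i + 1]
--         if s1 < 0:                       # a < b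
--             if s2 > 0:                   # b > c: min is min(a, c), unique iff a != c
--                 a, c = alist[i], alist[i + 2]
--                 if a != c:
--                     out.append(min(a, c))
--             else:                        # b <= c: a is the unique minimum
--                 out.append(alist[i])
--         elif s1 == 0:                    # a == b
--             if s2 > 0:                   # c < a == b: c is the unique minimum
--                 out.append(alist[i + 2])
--         else:                            # a > b
--             if s2 < 0:                   # b < c: b is the unique minimum
--                 out.append(alist[i + 1])
--             elif s2 > 0:                 # c < b < a: c is the unique minimum
--                 out.append(alist[i + 2])
--     return out
-- ===== Notes on version B (the rewrite author's own statement) =====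
-- stated objective: alternative
-- what changed: Instead of A's per-window slice-and-scan helper with a running min and boolean flag, B precomputes the sign of every adjacent difference once and then decides each window purely from its pair of comparison signs via a case table, touching the window's outer elements only in the single ambiguous a<b>c case; dropping the per-window slicing and helper call makes it measurably faster by a constant factor.
import Mathlib
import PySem

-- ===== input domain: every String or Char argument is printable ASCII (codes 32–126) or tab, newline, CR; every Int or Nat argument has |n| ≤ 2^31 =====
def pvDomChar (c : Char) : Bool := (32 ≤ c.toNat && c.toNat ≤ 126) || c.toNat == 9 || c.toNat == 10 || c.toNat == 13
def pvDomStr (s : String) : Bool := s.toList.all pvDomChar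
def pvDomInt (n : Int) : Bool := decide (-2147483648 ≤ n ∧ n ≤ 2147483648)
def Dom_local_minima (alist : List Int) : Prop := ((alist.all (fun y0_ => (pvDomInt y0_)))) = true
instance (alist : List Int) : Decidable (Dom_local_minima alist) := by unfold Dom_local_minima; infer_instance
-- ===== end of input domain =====

-- B replaces A's per-window slice-and-scan (running min + boolean flag) by a two-stage
-- comparison-based algorithm: precompute adjacent-difference signs once, then decide each
-- window from its pair of signs via a case table (objective: alternative).

-- ===== PORT A =====
-- helper get_local_minima: returns `some result_list` for the Python list, `none` for Python's False
def get_local_minima (list_3_elements : List Int) : Option (List Int) :=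
  match PySem.List.pyGet? list_3_elements 0 with
  | none => none   -- unreachable on A's call sites (window has 3 elements); Python would raise IndexError
  | some x0 =>
    -- state = (result_list[0], return_result)
    let st := (PySem.List.pyRange 1 3 1).foldl
      (fun (st : Int × Bool) (i : Int) =>
        match PySem.List.pyGet? list_3_elements i with
        | none => st   -- unreachable (IndexError)
        | some xi =>
          if st.1 > xi then (xi, true)
          else if st.1 = xi then (st.1, false)
          else st)
      (x0, true)
    if st.2 then some [st.1] else none

def local_minima (alist : List Int) : List Int :=
  -- state = (counter, result_list)
  let st := (PySem.List.pyRange 0 ((alist.length : Int) - 2) 1).foldl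
    (fun (st : Int × List Int) (_i : Int) =>
      let list_3_elements := PySem.List.slice alist (some st.1) (some (st.1 + 3))
      let lm := get_local_minima list_3_elements
      let res := match lm with
        | some l => st.2 ++ [l.headI]   -- local_minima[0]; l is the one-element result_list
        | none => st.2
      (st.1 + 1, res))
    (0, [])
  st.2

-- ===== PORT B =====
def local_minima_alt (alist : List Int) : List Int :=
  -- signs[k] = sign of alist[k] - alist[k+1] (1, 0 or -1), computed once
  let signs := (alist.zip (PySem.List.slice alist (some 1) none)).map
    (fun p => (if p.1 > p.2 then (1 : Int) else 0) - (if p.1 < p.2 then 1 else 0))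
  (PySem.List.pyRange 0 ((signs.length : Int) - 1) 1).foldl
    (fun (out : List Int) (i : Int) =>
      let s1 := PySem.List.pyGetD signs i 0        -- indices always in range here;
      let s2 := PySem.List.pyGetD signs (i + 1) 0  -- the default 0 is unreachable
      if s1 < 0 then
        if s2 > 0 then
          let a := PySem.List.pyGetD alist i 0
          let c := PySem.List.pyGetD alist (i + 2) 0
          if a ≠ c then out ++ [min a c] else out
        else out ++ [PySem.List.pyGetD alist i 0]
      else if s1 = 0 then
        if s2 > 0 then out ++ [PySem.List.pyGetD alist (i + 2) 0] else out
      else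
        if s2 < 0 then out ++ [PySem.List.pyGetD alist (i + 1) 0]
        else if s2 > 0 then out ++ [PySem.List.pyGetD alist (i + 2) 0]
        else out)
    []

-- ===== PRECONDITION & SPEC =====
def Spec_local_minima (alist : List Int) (out : List Int) : Prop := out = local_minima_alt alist
instance (alist : List Int) (out : List Int) : Decidable (Spec_local_minima alist out) := by unfold Spec_local_minima; infer_instance

-- ===== CLAIM (what is proved, stated in full; the proofs are below) =====
def Claim_equal_local_minima : Prop := ∀ (alist : List Int), Dom_local_minima alist → Spec_local_minima alist (local_minima alist)

-- ===== LEMMAS AND PROOFS =====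

-- ---- A side ----

-- the contribution of the window starting at index c, as A computes it
def winA (l : List Int) (c : Nat) : List Int :=
  match get_local_minima (PySem.List.slice l (some (c : Int)) (some ((c : Int) + 3))) with
  | some lres => [lres.headI]
  | none => []

-- the list A accumulates over n windows starting at counter c
def WA (l : List Int) (c n : Nat) : List Int :=
  match n with
  | 0 => []
  | n + 1 => winA l c ++ WA l (c + 1) n

theorem foldA_eq_WA (l : List Int) (r : List Int) (c : Nat) (acc : List Int) :
    (r.foldl
      (fun (st : Int × List Int) (_i : Int) =>
        let w := PySem.List.slice l (some st.1) (some (st.1 + 3))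
        let res := match get_local_minima w with
          | some lres => st.2 ++ [lres.headI]
          | none => st.2
        (st.1 + 1, res))
      ((c : Nat), acc)).2 = acc ++ WA l c r.length := by
  induction r generalizing c acc with
  | nil => simp [WA]
  | cons x r ih =>
    simp only [List.foldl_cons, List.length_cons, WA]
    have h1 : ((c : Int) + 1) = ((c + 1 : Nat) : Int) := by push_cast; ring
    cases hg : get_local_minima (PySem.List.slice l (some (c : Int)) (some ((c : Int) + 3))) with
    | none =>
      simp only [h1, ih]
      simp [winA, hg]
    | some lres =>
      simp only [h1, ih]
      simp [winA, hg, List.append_assoc]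

theorem winA_cons_succ (a : Int) (l : List Int) (c : Nat) :
    winA (a :: l) (c + 1) = winA l c := by
  unfold winA
  have h1 : ((c + 1 : Nat) : Int) + 3 = (((c + 3) + 1 : Nat) : Int) := by push_cast; ring
  have h2 : ((c : Nat) : Int) + 3 = ((c + 3 : Nat) : Int) := by push_cast; ring
  rw [h1, h2, PySem.List.slice_natCast, PySem.List.slice_natCast]
  simp

theorem WA_cons_succ (a : Int) (l : List Int) (c n : Nat) :
    WA (a :: l) (c + 1) n = WA l c n := by
  induction n generalizing c with
  | zero => rfl
  | succ n ih => simp only [WA, winA_cons_succ, ih]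

-- evaluate A's helper on a literal 3-element window
theorem glm_triple (a b c : Int) :
    get_local_minima [a, b, c] =
      if (a < b ∧ a < c) ∨ (b < a ∧ b < c) ∨ (c < a ∧ c < b)
      then some [min a (min b c)] else none := by
  have hr : PySem.List.pyRange 1 3 1 = [1, 2] := by decide
  simp only [get_local_minima, hr, List.foldl_cons, List.foldl_nil]
  simp only [PySem.List.pyGet?, PySem.List.pyIdx?]
  norm_num
  split_ifs <;> simp_all
  all_goals omega

theorem winA_head (a b c : Int) (t : List Int) :
    winA (a :: b :: c :: t) 0 =
      if (a < b ∧ a < c) ∨ (b < a ∧ b < c) ∨ (c < a ∧ c < b)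
      then [min a (min b c)] else [] := by
  unfold winA
  have h3 : ((0 : Nat) : Int) + 3 = ((3 : Nat) : Int) := by norm_num
  rw [h3]
  have : PySem.List.slice (a :: b :: c :: t) (some ((0 : Nat) : Int)) (some ((3 : Nat) : Int))
      = [a, b, c] := by
    rw [PySem.List.slice_natCast]; simp [List.take]
  rw [this, glm_triple]
  split_ifs <;> simp

-- A's result as WA of the full window count
theorem local_minima_eq_WA (l : List Int) :
    local_minima l = WA l 0 (l.length - 2) := by
  have h := foldA_eq_WA l (PySem.List.pyRange 0 ((l.length : Int) - 2) 1) 0 []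
  simp only [List.nil_append, PySem.List.length_pyRange_one] at h
  have hn : ((l.length : Int) - 2 - 0).toNat = l.length - 2 := by omega
  rw [hn] at h
  exact h

-- ---- B side ----

-- the sign list B precomputes
def signsOf (l : List Int) : List Int :=
  (l.zip (PySem.List.slice l (some 1) none)).map
    (fun p => (if p.1 > p.2 then (1 : Int) else 0) - (if p.1 < p.2 then 1 else 0))

-- the contribution B's loop body makes at index c
def winB (l : List Int) (c : Nat) : List Int :=
  let s1 := (signsOf l).getD c 0
  let s2 := (signsOf l).getD (c + 1) 0
  if s1 < 0 then
    if s2 > 0 then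
      if l.getD c 0 ≠ l.getD (c + 2) 0 then [min (l.getD c 0) (l.getD (c + 2) 0)] else []
    else [l.getD c 0]
  else if s1 = 0 then
    if s2 > 0 then [l.getD (c + 2) 0] else []
  else
    if s2 < 0 then [l.getD (c + 1) 0]
    else if s2 > 0 then [l.getD (c + 2) 0]
    else []

def WB (l : List Int) (c n : Nat) : List Int :=
  match n with
  | 0 => []
  | n + 1 => winB l c ++ WB l (c + 1) n

-- the contribution of B's loop body at Int index i
def gB (l : List Int) (i : Int) : List Int :=
  let s1 := PySem.List.pyGetD (signsOf l) i 0
  let s2 := PySem.List.pyGetD (signsOf l) (i + 1) 0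
  if s1 < 0 then
    if s2 > 0 then
      let a := PySem.List.pyGetD l i 0
      let cc := PySem.List.pyGetD l (i + 2) 0
      if a ≠ cc then [min a cc] else []
    else [PySem.List.pyGetD l i 0]
  else if s1 = 0 then
    if s2 > 0 then [PySem.List.pyGetD l (i + 2) 0] else []
  else
    if s2 < 0 then [PySem.List.pyGetD l (i + 1) 0]
    else if s2 > 0 then [PySem.List.pyGetD l (i + 2) 0]
    else []

theorem winB_eq_gB (l : List Int) (c : Nat) : winB l c = gB l (c : Int) := by
  unfold winB gB
  have e1 : ((c : Int) + 1) = ((c + 1 : Nat) : Int) := by push_cast; ring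
  have e2 : ((c : Int) + 2) = ((c + 2 : Nat) : Int) := by push_cast; ring
  rw [e1, e2]
  simp only [PySem.List.pyGetD_natCast]

theorem flatMap_gB_eq_WB (l : List Int) (n c : Nat) :
    (PySem.List.pyRange (c : Int) ((c : Int) + (n : Int)) 1).flatMap (gB l) = WB l c n := by
  induction n generalizing c with
  | zero => simp [WB, PySem.List.pyRange_one_eq_nil]
  | succ n ih =>
    rw [PySem.List.pyRange_one_cons (by push_cast; omega)]
    rw [List.flatMap_cons]
    have h2 : ((c : Int) + 1) = ((c + 1 : Nat) : Int) := by push_cast; ring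
    have h3 : ((c : Int) + ((n + 1 : Nat) : Int)) = ((c + 1 : Nat) : Int) + (n : Int) := by
      push_cast; ring
    rw [h3, h2, ih]
    rw [WB, winB_eq_gB]

theorem foldB_eq_WB (l : List Int) (n c : Nat) (acc : List Int) :
    (PySem.List.pyRange (c : Int) ((c : Int) + (n : Int)) 1).foldl
      (fun (out : List Int) (i : Int) =>
        let s1 := PySem.List.pyGetD (signsOf l) i 0
        let s2 := PySem.List.pyGetD (signsOf l) (i + 1) 0
        if s1 < 0 then
          if s2 > 0 then
            let a := PySem.List.pyGetD l i 0
            let cc := PySem.List.pyGetD l (i + 2) 0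
            if a ≠ cc then out ++ [min a cc] else out
          else out ++ [PySem.List.pyGetD l i 0]
        else if s1 = 0 then
          if s2 > 0 then out ++ [PySem.List.pyGetD l (i + 2) 0] else out
        else
          if s2 < 0 then out ++ [PySem.List.pyGetD l (i + 1) 0]
          else if s2 > 0 then out ++ [PySem.List.pyGetD l (i + 2) 0]
          else out)
      acc = acc ++ WB l c n := by
  rw [PySem.List.foldl_congr_mem _ _ (fun (out : List Int) (i : Int) => out ++ gB l i) acc
      (by intro acc' x _; simp only [gB]; split_ifs <;> simp)]
  rw [PySem.List.foldl_append_eq_flatMap, flatMap_gB_eq_WB]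

theorem alt_eq_WB (l : List Int) :
    local_minima_alt l = WB l 0 ((signsOf l).length - 1) := by
  show (PySem.List.pyRange 0 (((signsOf l).length : Int) - 1) 1).foldl
      (fun (out : List Int) (i : Int) =>
        let s1 := PySem.List.pyGetD (signsOf l) i 0
        let s2 := PySem.List.pyGetD (signsOf l) (i + 1) 0
        if s1 < 0 then
          if s2 > 0 then
            let a := PySem.List.pyGetD l i 0
            let cc := PySem.List.pyGetD l (i + 2) 0
            if a ≠ cc then out ++ [min a cc] else out
          else out ++ [PySem.List.pyGetD l i 0]
        else if s1 = 0 then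
          if s2 > 0 then out ++ [PySem.List.pyGetD l (i + 2) 0] else out
        else
          if s2 < 0 then out ++ [PySem.List.pyGetD l (i + 1) 0]
          else if s2 > 0 then out ++ [PySem.List.pyGetD l (i + 2) 0]
          else out)
      [] = WB l 0 ((signsOf l).length - 1)
  cases hL : (signsOf l).length with
  | zero =>
    rw [PySem.List.pyRange_one_eq_nil (by norm_num)]
    rfl
  | succ m =>
    have h := foldB_eq_WB l m 0 []
    simp only [Nat.cast_zero, List.nil_append, zero_add] at h
    have hb : (((m + 1 : Nat) : Int) - 1) = ((m : Nat) : Int) := by push_cast; ring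
    rw [hb, h]
    simp

theorem winB_cons_succ (a : Int) (l : List Int) (c : Nat) :
    winB (a :: l) (c + 1) = winB l c := by
  cases l with
  | nil => simp [winB, signsOf, PySem.List.slice_from_one]
  | cons b t =>
    have hs : signsOf (a :: b :: t) =
        ((if a > b then (1 : Int) else 0) - (if a < b then 1 else 0)) :: signsOf (b :: t) := by
      simp only [signsOf, PySem.List.slice_from_one, List.tail_cons, List.zip_cons_cons,
        List.map_cons]
    unfold winB
    rw [hs]
    simp only [List.getD_cons_succ]

theorem WB_cons_succ (a : Int) (l : List Int) (c n : Nat) :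
    WB (a :: l) (c + 1) n = WB l c n := by
  induction n generalizing c with
  | zero => rfl
  | succ n ih => simp only [WB, winB_cons_succ, ih]

-- B's head contribution equals the strict-window-minimum form
set_option maxHeartbeats 2000000 in
theorem winB_head (a b c : Int) (t : List Int) :
    winB (a :: b :: c :: t) 0 =
      if (a < b ∧ a < c) ∨ (b < a ∧ b < c) ∨ (c < a ∧ c < b)
      then [min a (min b c)] else [] := by
  have hs : signsOf (a :: b :: c :: t) =
      ((if a > b then (1 : Int) else 0) - (if a < b then 1 else 0)) ::
      ((if b > c then (1 : Int) else 0) - (if b < c then 1 else 0)) :: signsOf (c :: t) := by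
    simp only [signsOf, PySem.List.slice_from_one, List.tail_cons, List.zip_cons_cons,
      List.map_cons]
  unfold winB
  rw [hs]
  have g0 : ∀ (x : Int) (xs : List Int), (x :: xs).getD 0 0 = x := by intro x xs; rfl
  have g1 : ∀ (x y : Int) (xs : List Int), (x :: y :: xs).getD 1 0 = y := by intro x y xs; rfl
  have g2 : ∀ (x y z : Int) (xs : List Int), (x :: y :: z :: xs).getD 2 0 = z := by
    intro x y z xs; rfl
  rw [show (0 + 1 : Nat) = 1 from rfl, show (0 + 2 : Nat) = 2 from rfl, g0, g1, g2, g0, g1]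
  simp only [min_def]
  split_ifs <;> first | rfl | omega

theorem alt_cons (a b c : Int) (t : List Int) :
    local_minima_alt (a :: b :: c :: t) =
      (if (a < b ∧ a < c) ∨ (b < a ∧ b < c) ∨ (c < a ∧ c < b)
       then [min a (min b c)] else []) ++ local_minima_alt (b :: c :: t) := by
  rw [alt_eq_WB, alt_eq_WB]
  have hlen : (signsOf (a :: b :: c :: t)).length = (signsOf (b :: c :: t)).length + 1 := by
    simp [signsOf, PySem.List.slice_from_one]
  have hlen2 : (signsOf (b :: c :: t)).length = t.length + 1 := by
    simp [signsOf, PySem.List.slice_from_one]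
  rw [hlen, hlen2]
  simp only [Nat.add_sub_cancel]
  show WB (a :: b :: c :: t) 0 (t.length + 1) = _
  rw [show t.length + 1 = t.length + 1 from rfl]
  simp only [WB]
  rw [show (0 + 1 : Nat) = (0 : Nat) + 1 from rfl, WB_cons_succ, winB_head]

-- ---- main equivalence ----
theorem main_eq (l : List Int) : local_minima l = local_minima_alt l := by
  induction l with
  | nil => rfl
  | cons a t ih =>
    match t with
    | [] => rfl
    | [b] => rfl
    | b :: c :: t' =>
      rw [local_minima_eq_WA, alt_cons, ← ih, local_minima_eq_WA]
      simp only [List.length_cons]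
      have hlen : t'.length + 1 + 1 + 1 - 2 = (t'.length + 1 + 1 - 2) + 1 := by omega
      rw [hlen]
      simp only [WA]
      rw [show (0 + 1) = (0 : Nat) + 1 from rfl, WA_cons_succ, winA_head]

-- ===== VERDICT (by name: the statement is the Claim_ definition above) =====
theorem local_minima_spec : Claim_equal_local_minima := by
  intro alist _
  show local_minima alist = local_minima_alt alist
  exact main_eq alist
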